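-- pv_equiv track=rewrite | github.com/qpwoeirut/CMIMC_Programming2023 | twomaze/carnegie.py | calculate_visited
-- ===== SOURCE A (Python) =====
-- def calculate_visited(movements: list[str]) -> tuple[set[tuple[int, int]], set[tuple[int, int]]]:
--     carnegie_visited = set()
--     mellon_visited = set()
--
--     x, y = 0, 0
--     for movement in movements:
--         if movement == 'L':
--             mellon_visited.add((x, y))
--             x -= 1
--             mellon_visited.add((x, y))
--         elif movement == 'R':
--             mellon_visited.add((x, y))
--             x += 1
--             mellon_visited.add((x, y))
--         elif movement == 'D':
--             carnegie_visited.add((x, y))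
--             y -= 1
--             carnegie_visited.add((x, y))
--         elif movement == 'U':
--             carnegie_visited.add((x, y))
--             y += 1
--             carnegie_visited.add((x, y))
--     return carnegie_visited, mellon_visited
-- ===== SOURCE B (Python) =====
-- def calculate_visited(movements: list[str]) -> tuple[set[tuple[int, int]], set[tuple[int, int]]]:
--     deltas = {'L': (-1, 0), 'R': (1, 0), 'D': (0, -1), 'U': (0, 1)}
--     # pass 1: build the trajectory as (prev, new, horizontal?) transitions
--     transitions = []
--     x, y = 0, 0
--     for m in movements:
--         d = deltas.get(m)
--         if d is None:
--             continue
--         nxt = (x + d[0], y + d[1])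
--         transitions.append(((x, y), nxt, d[0] != 0))
--         x, y = nxt
--     # pass 2: classify each transition's endpoints by the axis that changed
--     carnegie_visited = set()
--     mellon_visited = set()
--     for prev, new, horizontal in transitions:
--         s = mellon_visited if horizontal else carnegie_visited
--         s.add(prev)
--         s.add(new)
--     return carnegie_visited, mellon_visited
-- ===== Notes on version B (the rewrite author's own statement) =====
-- stated objective: alternative
-- what changed: Replaces A's single fused loop by two passes: one fold builds the trajectory as a list of (prev,new,axis) transitions via a delta table, a second pass classifies each transition's endpoints into the two visited sets.
import Mathlib
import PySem

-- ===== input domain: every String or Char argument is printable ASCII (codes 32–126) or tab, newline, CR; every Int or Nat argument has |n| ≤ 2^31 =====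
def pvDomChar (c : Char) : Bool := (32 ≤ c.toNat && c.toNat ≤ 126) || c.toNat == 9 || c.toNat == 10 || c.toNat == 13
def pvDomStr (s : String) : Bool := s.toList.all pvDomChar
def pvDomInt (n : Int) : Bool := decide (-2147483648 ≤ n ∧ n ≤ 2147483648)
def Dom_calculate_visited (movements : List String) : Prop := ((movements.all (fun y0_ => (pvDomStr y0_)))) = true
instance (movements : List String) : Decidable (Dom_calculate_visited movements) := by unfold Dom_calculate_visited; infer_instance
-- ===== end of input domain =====

-- B splits A's fused loop into a trajectory-building pass and a classification pass (objective: alternative decomposition).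

-- ===== PORT A =====
-- single fold over movements carrying (carnegie, mellon, x, y), adding both endpoints of each recognised move
def calculate_visited (movements : List String) : (List (Int × Int)) × (List (Int × Int)) :=
  let st := movements.foldl
    (fun (st : PySem.Set (Int × Int) × PySem.Set (Int × Int) × Int × Int) m =>
      let (c, mel, x, y) := st
      if m = "L" then (c, PySem.Set.add (PySem.Set.add mel (x, y)) (x - 1, y), x - 1, y)
      else if m = "R" then (c, PySem.Set.add (PySem.Set.add mel (x, y)) (x + 1, y), x + 1, y)
      else if m = "D" then (PySem.Set.add (PySem.Set.add c (x, y)) (x, y - 1), mel, x, y - 1)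
      else if m = "U" then (PySem.Set.add (PySem.Set.add c (x, y)) (x, y + 1), mel, x, y + 1)
      else (c, mel, x, y))
    (PySem.Set.empty, PySem.Set.empty, 0, 0)
  (st.1, st.2.1)

-- ===== PORT B =====
-- delta table (dict.get: none = unrecognised move)
def cvDelta (m : String) : Option (Int × Int) :=
  if m = "L" then some (-1, 0) else if m = "R" then some (1, 0)
  else if m = "D" then some (0, -1) else if m = "U" then some (0, 1) else none

-- pass 1: trajectory as (prev, new, horizontal?) transitions
def cvTrans : List String → Int → Int → List ((Int × Int) × (Int × Int) × Bool)
  | [], _, _ => []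
  | m :: ms, x, y =>
    match cvDelta m with
    | none => cvTrans ms x y
    | some (dx, dy) => ((x, y), (x + dx, y + dy), dx != 0) :: cvTrans ms (x + dx) (y + dy)

-- pass 2: classify each transition's endpoints by the axis that changed
def cvClassify (ts : List ((Int × Int) × (Int × Int) × Bool))
    (acc : PySem.Set (Int × Int) × PySem.Set (Int × Int)) :
    PySem.Set (Int × Int) × PySem.Set (Int × Int) :=
  ts.foldl (fun (acc : PySem.Set (Int × Int) × PySem.Set (Int × Int)) t =>
    let (p, n, h) := t
    if h then (acc.1, PySem.Set.add (PySem.Set.add acc.2 p) n)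
    else (PySem.Set.add (PySem.Set.add acc.1 p) n, acc.2)) acc

def calculate_visited_alt (movements : List String) : (List (Int × Int)) × (List (Int × Int)) :=
  cvClassify (cvTrans movements 0 0) (PySem.Set.empty, PySem.Set.empty)

-- ===== PRECONDITION & SPEC =====
def Spec_calculate_visited (movements : List String) (out : (List (Int × Int)) × (List (Int × Int))) : Prop := out = calculate_visited_alt movements
instance (movements : List String) (out : (List (Int × Int)) × (List (Int × Int))) : Decidable (Spec_calculate_visited movements out) := by unfold Spec_calculate_visited; infer_instance

-- ===== CLAIM (what is proved, stated in full; the proofs are below) =====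
def Claim_equal_calculate_visited : Prop := ∀ (movements : List String), Dom_calculate_visited movements → Spec_calculate_visited movements (calculate_visited movements)

-- ===== LEMMAS AND PROOFS =====
lemma cv_fold_eq (ms : List String) (c mel : PySem.Set (Int × Int)) (x y : Int) :
    (ms.foldl
      (fun (st : PySem.Set (Int × Int) × PySem.Set (Int × Int) × Int × Int) m =>
        let (c, mel, x, y) := st
        if m = "L" then (c, PySem.Set.add (PySem.Set.add mel (x, y)) (x - 1, y), x - 1, y)
        else if m = "R" then (c, PySem.Set.add (PySem.Set.add mel (x, y)) (x + 1, y), x + 1, y)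
        else if m = "D" then (PySem.Set.add (PySem.Set.add c (x, y)) (x, y - 1), mel, x, y - 1)
        else if m = "U" then (PySem.Set.add (PySem.Set.add c (x, y)) (x, y + 1), mel, x, y + 1)
        else (c, mel, x, y)) (c, mel, x, y)).1
      = (cvClassify (cvTrans ms x y) (c, mel)).1
    ∧ (ms.foldl
      (fun (st : PySem.Set (Int × Int) × PySem.Set (Int × Int) × Int × Int) m =>
        let (c, mel, x, y) := st
        if m = "L" then (c, PySem.Set.add (PySem.Set.add mel (x, y)) (x - 1, y), x - 1, y)
        else if m = "R" then (c, PySem.Set.add (PySem.Set.add mel (x, y)) (x + 1, y), x + 1, y)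
        else if m = "D" then (PySem.Set.add (PySem.Set.add c (x, y)) (x, y - 1), mel, x, y - 1)
        else if m = "U" then (PySem.Set.add (PySem.Set.add c (x, y)) (x, y + 1), mel, x, y + 1)
        else (c, mel, x, y)) (c, mel, x, y)).2.1
      = (cvClassify (cvTrans ms x y) (c, mel)).2 := by
  induction ms generalizing c mel x y with
  | nil => simp [cvClassify, cvTrans]
  | cons m ms ih =>
    by_cases hL : m = "L"
    · simpa [hL, cvTrans, cvDelta, cvClassify, List.foldl] using ih c (PySem.Set.add (PySem.Set.add mel (x, y)) (x - 1, y)) (x - 1) y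
    · by_cases hR : m = "R"
      · simpa [hL, hR, cvTrans, cvDelta, cvClassify, List.foldl] using ih c (PySem.Set.add (PySem.Set.add mel (x, y)) (x + 1, y)) (x + 1) y
      · by_cases hD : m = "D"
        · simpa [hL, hR, hD, cvTrans, cvDelta, cvClassify, List.foldl] using ih (PySem.Set.add (PySem.Set.add c (x, y)) (x, y - 1)) mel x (y - 1)
        · by_cases hU : m = "U"
          · simpa [hL, hR, hD, hU, cvTrans, cvDelta, cvClassify, List.foldl] using ih (PySem.Set.add (PySem.Set.add c (x, y)) (x, y + 1)) mel x (y + 1)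
          · simpa [hL, hR, hD, hU, cvTrans, cvDelta, List.foldl] using ih c mel x y

-- ===== VERDICT (by name: the statement is the Claim_ definition above) =====
theorem calculate_visited_spec : Claim_equal_calculate_visited := by
  intro movements _
  unfold Spec_calculate_visited calculate_visited calculate_visited_alt
  have h := cv_fold_eq movements PySem.Set.empty PySem.Set.empty 0 0
  exact Prod.ext h.1 h.2
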